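-- pv_equiv track=rewrite | github.com/rp98/Desert-Hack | app.py | takenote
-- ===== SOURCE A (Python) =====
-- def takenote(text):
--     text = text.split(' ')
--     text2 = []
--     for i in range(0, len(text)):
--         if ((text[i] == 'take' and text[i+1] == 'note') or (text[i-1] == 'kaya' and text[i] == 'take' and text[i+1] == 'note')):
--             for j in range(i+2, len(text)):
--                 if text[j] == 'stop':
--                     break
--                 text2.append(text[j])
--                 text[j] = '0'
--     k = " "
--     text = k.join(text)
--     s = " "
--     s = s.join(text2)
--     return(s, text)
-- ===== SOURCE B (Python) =====
-- def takenote(text):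
--     words = text.split(' ')
--     out = list(words)
--     collected = []
--     collecting = False
--     i = 0
--     n = len(words)
--     while i < n:
--         if collecting:
--             if words[i] == 'stop':
--                 collecting = False
--             else:
--                 collected.append(words[i])
--                 out[i] = '0'
--         elif words[i] == 'take' and words[i + 1] == 'note':
--             collecting = True
--             i += 1  # skip the 'note' marker too
--         i += 1
--     return (' '.join(collected), ' '.join(out))
-- ===== Notes on version B (the rewrite author's own statement) =====
-- stated objective: simpler
-- what changed: A's nested loops (an outer index scan that, at each 'take note' marker, runs an inner burn loop and then re-scans the zeroed positions) are replaced by a single left-to-right pass with a boolean 'collecting' flag that consumes words until 'stop'.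
import Mathlib
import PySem

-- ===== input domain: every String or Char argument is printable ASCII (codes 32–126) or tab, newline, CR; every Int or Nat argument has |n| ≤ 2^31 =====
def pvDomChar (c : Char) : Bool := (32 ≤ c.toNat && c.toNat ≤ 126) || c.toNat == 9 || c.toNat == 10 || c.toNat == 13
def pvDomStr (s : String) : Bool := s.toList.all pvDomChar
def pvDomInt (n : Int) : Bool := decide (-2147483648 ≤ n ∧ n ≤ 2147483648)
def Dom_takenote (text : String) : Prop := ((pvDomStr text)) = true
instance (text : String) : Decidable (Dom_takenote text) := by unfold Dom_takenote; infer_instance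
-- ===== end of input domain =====

-- B replaces A's nested rescanning loops by a single left-to-right pass with a `collecting` flag (objective: simpler).
-- Loop recursions carry a fuel argument (structural recursion); every call supplies fuel ≥ the remaining
-- iteration count (the list length), so the fuel-0 branch is never the one that ends a run.

-- ===== PORT A =====
-- inner 'for j in range(i+2, len(text)): if text[j]=="stop": break; text2.append(text[j]); text[j]="0"'
def takenoteInner : Nat → List String → List String → Nat → (List String × List String)
  | 0, t, c, _ => (t, c)
  | fuel + 1, t, c, j =>
    if h : j < t.length then
      if t[j] = "stop" then (t, c)
      else takenoteInner fuel (t.set j "0") (c ++ [t[j]]) (j + 1)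
    else (t, c)

-- the 'if' condition of A; out-of-range text[i+1] would be an IndexError in Python
-- (excluded by Pre_takenote) — here pyGet? returns none and the condition is false.
def takenoteCond (t : List String) (i : Nat) : Bool :=
  (PySem.List.pyGet? t (i : Int) == some "take" && PySem.List.pyGet? t ((i : Int) + 1) == some "note")
  || (PySem.List.pyGet? t ((i : Int) - 1) == some "kaya" && PySem.List.pyGet? t (i : Int) == some "take"
        && PySem.List.pyGet? t ((i : Int) + 1) == some "note")

-- 'for i in range(0, len(text))' with the mutated list and text2 as loop state
def takenoteOuter : Nat → List String → List String → Nat → (List String × List String)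
  | 0, t, c, _ => (t, c)
  | fuel + 1, t, c, i =>
    if i < t.length then
      if takenoteCond t i then
        let p := takenoteInner t.length t c (i + 2)
        takenoteOuter fuel p.1 p.2 (i + 1)
      else takenoteOuter fuel t c (i + 1)
    else (t, c)

def takenote (text : String) : String × String :=
  let t := (PySem.Str.split? text " ").getD []
  let r := takenoteOuter t.length t [] 0
  (PySem.Str.join " " r.2, PySem.Str.join " " r.1)

-- ===== PORT B =====
-- single pass: i, collecting flag, out (copy of words, overwritten with "0"), collected
def takenoteLoop (words : List String) : Nat → Nat → Bool → List String → List String → (List String × List String)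
  | 0, _, _, out, collected => (out, collected)
  | fuel + 1, i, collecting, out, collected =>
    if h : i < words.length then
      if collecting then
        if words[i] = "stop" then takenoteLoop words fuel (i + 1) false out collected
        else takenoteLoop words fuel (i + 1) true (out.set i "0") (collected ++ [words[i]])
      else if (words[i] == "take") && (PySem.List.pyGet? words ((i : Int) + 1) == some "note") then
        takenoteLoop words fuel (i + 2) true out collected
      else takenoteLoop words fuel (i + 1) false out collected
    else (out, collected)

def takenote_alt (text : String) : String × String :=
  let words := (PySem.Str.split? text " ").getD []
  let r := takenoteLoop words words.length 0 false words []
  (PySem.Str.join " " r.2, PySem.Str.join " " r.1)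

-- ===== PRECONDITION & SPEC =====
-- Pre_ excludes exactly the inputs on which the Python A raises IndexError (text[i+1] past the
-- end): the last space-split word is 'take' and no 'take note' marker region runs unstopped to
-- the end of the list to overwrite that trailing 'take' with '0'; Python B raises there too.
def Pre_takenote (text : String) : Prop :=
  let ws := (PySem.Str.split? text " ").getD []
  ws.getLast? = some "take" →
    ∃ p ∈ List.range ws.length, p + 2 < ws.length ∧ ws[p]? = some "take" ∧
      ws[p + 1]? = some "note" ∧
      ∀ j ∈ List.range ws.length, p + 2 ≤ j → j < ws.length - 1 → ws[j]? ≠ some "stop"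
instance (text : String) : Decidable (Pre_takenote text) := by unfold Pre_takenote; infer_instance

def pvWitness_takenote : String := "take note a b stop c"

def Spec_takenote (text : String) (out : String × String) : Prop := out = takenote_alt text
instance (text : String) (out : String × String) : Decidable (Spec_takenote text out) := by unfold Spec_takenote; infer_instance

-- ===== CLAIM (what is proved, stated in full; the proofs are below) =====
def Claim_equal_takenote : Prop := ∀ (text : String), Dom_takenote text → Pre_takenote text → Spec_takenote text (takenote text)

-- ===== LEMMAS AND PROOFS =====

-- exhausted index: each loop returns its state whatever the fuel
theorem tInner_stop (f : Nat) (t c : List String) (j : Nat) (h : ¬ j < t.length) :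
    takenoteInner f t c j = (t, c) := by
  cases f <;> simp [takenoteInner, h]

theorem tOuter_stop (f : Nat) (t c : List String) (i : Nat) (h : ¬ i < t.length) :
    takenoteOuter f t c i = (t, c) := by
  cases f <;> simp [takenoteOuter, h]

theorem tLoop_stop (ws : List String) (f i : Nat) (coll : Bool) (out c : List String)
    (h : ¬ i < ws.length) : takenoteLoop ws f i coll out c = (out, c) := by
  cases f <;> simp [takenoteLoop, h]

theorem takenoteInner_length (f : Nat) (t c : List String) (j : Nat) :
    (takenoteInner f t c j).1.length = t.length := by
  induction f generalizing t c j with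
  | zero => rfl
  | succ f ih =>
      simp only [takenoteInner]
      split_ifs with h1 h2
      · rfl
      · simpa using ih (t.set j "0") (c ++ [t[j]]) (j + 1)
      · rfl

-- sufficient fuel is irrelevant
theorem tInner_mono (f1 : Nat) : ∀ (f2 : Nat) (t c : List String) (j : Nat),
    t.length ≤ j + f1 → f1 ≤ f2 → takenoteInner f1 t c j = takenoteInner f2 t c j := by
  induction f1 with
  | zero =>
      intro f2 t c j hs _
      have h : ¬ j < t.length := by omega
      rw [tInner_stop _ _ _ _ h, tInner_stop _ _ _ _ h]
  | succ f ih =>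
      intro f2 t c j hs hle
      by_cases hj : j < t.length
      · obtain ⟨g, rfl⟩ : ∃ g, f2 = g + 1 := ⟨f2 - 1, by omega⟩
        simp only [takenoteInner, dif_pos hj]
        by_cases hstop : t[j] = "stop"
        · rw [if_pos hstop, if_pos hstop]
        · rw [if_neg hstop, if_neg hstop]
          exact ih g (t.set j "0") (c ++ [t[j]]) (j + 1) (by simpa using by omega) (by omega)
      · rw [tInner_stop _ _ _ _ hj, tInner_stop _ _ _ _ hj]

theorem tLoop_mono (ws : List String) (f1 : Nat) : ∀ (f2 i : Nat) (coll : Bool) (out c : List String),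
    ws.length ≤ i + f1 → f1 ≤ f2 →
    takenoteLoop ws f1 i coll out c = takenoteLoop ws f2 i coll out c := by
  induction f1 with
  | zero =>
      intro f2 i coll out c hs _
      have h : ¬ i < ws.length := by omega
      rw [tLoop_stop _ _ _ _ _ _ h, tLoop_stop _ _ _ _ _ _ h]
  | succ f ih =>
      intro f2 i coll out c hs hle
      by_cases hi : i < ws.length
      · obtain ⟨g, rfl⟩ : ∃ g, f2 = g + 1 := ⟨f2 - 1, by omega⟩
        simp only [takenoteLoop, dif_pos hi]
        cases coll with
        | true =>
            rw [if_pos rfl, if_pos rfl]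
            by_cases hstop : ws[i] = "stop"
            · rw [if_pos hstop, if_pos hstop]
              exact ih g (i + 1) false out c (by omega) (by omega)
            · rw [if_neg hstop, if_neg hstop]
              exact ih g (i + 1) true (out.set i "0") (c ++ [ws[i]]) (by omega) (by omega)
        | false =>
            rw [if_neg Bool.false_ne_true, if_neg Bool.false_ne_true]
            by_cases hmk : ((ws[i] == "take") && (PySem.List.pyGet? ws ((i : Int) + 1) == some "note")) = true
            · rw [if_pos hmk, if_pos hmk]
              exact ih g (i + 2) true out c (by omega) (by omega)
            · rw [if_neg hmk, if_neg hmk]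
              exact ih g (i + 1) false out c (by omega) (by omega)
      · rw [tLoop_stop _ _ _ _ _ _ hi, tLoop_stop _ _ _ _ _ _ hi]

-- getElem? transport along a drop-agreement
theorem pv_agree_get {t ws : List String} {i : Nat} (h : t.drop i = ws.drop i)
    (k : Nat) (hik : i ≤ k) : t[k]? = ws[k]? := by
  have h2 := congrArg (fun l => l[k - i]?) h
  simpa [List.getElem?_drop, Nat.add_sub_cancel' hik] using h2

theorem pv_agree_tail {t ws : List String} {i : Nat} (h : t.drop i = ws.drop i) :
    t.drop (i + 1) = ws.drop (i + 1) := by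
  have h2 := congrArg List.tail h
  simpa [List.tail_drop] using h2

theorem pv_drop_set {t : List String} {j : Nat} {v : String} :
    (t.set j v).drop (j + 1) = t.drop (j + 1) := by
  apply List.ext_getElem?
  intro m
  rw [List.getElem?_drop, List.getElem?_drop, List.getElem?_set_ne (by omega)]

-- A's condition collapses to its first clause (the kaya clause repeats it)
theorem takenoteCond_eq (t : List String) (i : Nat) :
    takenoteCond t i
      = (PySem.List.pyGet? t (i : Int) == some "take" && PySem.List.pyGet? t ((i : Int) + 1) == some "note") := by
  unfold takenoteCond
  cases PySem.List.pyGet? t (i : Int) == some "take" <;>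
    cases PySem.List.pyGet? t ((i : Int) + 1) == some "note" <;>
    cases PySem.List.pyGet? t ((i : Int) - 1) == some "kaya" <;> rfl

theorem takenoteCond_ne_take (t : List String) (i : Nat)
    (h : PySem.List.pyGet? t (i : Int) ≠ some "take") : takenoteCond t i = false := by
  rw [takenoteCond_eq]
  have hb : (PySem.List.pyGet? t (i : Int) == some "take") = false := by
    simpa using h
  rw [hb, Bool.false_and]

-- runs of indices with a false condition are skipped by A's outer loop (canonical fuel)
theorem takenoteOuter_skip (t c : List String) (d : Nat) : ∀ (a : Nat),
    (∀ k, a ≤ k → k < a + d → takenoteCond t k = false) →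
    takenoteOuter (t.length - a) t c a = takenoteOuter (t.length - (a + d)) t c (a + d) := by
  induction d with
  | zero => intro a _; rfl
  | succ d ih =>
      intro a h
      by_cases ha : a < t.length
      · have hf : t.length - a = (t.length - (a + 1)) + 1 := by omega
        rw [hf]
        simp only [takenoteOuter, if_pos ha]
        rw [if_neg (by simp [h a le_rfl (by omega)])]
        have h2 := ih (a + 1) (fun k hk1 hk2 => h k (by omega) (by omega))
        rw [h2]
        have hidx : a + 1 + d = a + (d + 1) := by omega
        rw [hidx]
      · rw [tOuter_stop _ _ _ _ ha, tOuter_stop _ _ _ _ (by omega)]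

-- characterisation of A's inner loop against B's collecting phase (canonical fuels)
theorem takenoteInner_sim (ws : List String) :
    ∀ j t c, j ≤ ws.length → t.length = ws.length → t.drop j = ws.drop j →
    ∃ s, j ≤ s ∧ s ≤ ws.length ∧
      (∀ k, k < j → (takenoteInner (ws.length - j) t c j).1[k]? = t[k]?) ∧
      (∀ k, j ≤ k → k < s → (takenoteInner (ws.length - j) t c j).1[k]? = some "0") ∧
      (takenoteInner (ws.length - j) t c j).1.drop s = ws.drop s ∧
      (s < ws.length → ws[s]? = some "stop") ∧
      takenoteLoop ws (ws.length - j) j true t c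
        = takenoteLoop ws (ws.length - (s + 1)) (s + 1) false
            (takenoteInner (ws.length - j) t c j).1 (takenoteInner (ws.length - j) t c j).2 := by
  intro j t c hj hlen hdrop
  induction hm : ws.length - j generalizing j t c with
  | zero =>
      have hjl : j = ws.length := by omega
      subst hjl
      have hI : takenoteInner 0 t c ws.length = (t, c) := rfl
      refine ⟨ws.length, le_rfl, le_rfl, ?_, ?_, ?_, ?_, ?_⟩
      · intro k _; rw [hI]
      · intro k hk1 hk2; omega
      · rw [hI]; exact hdrop
      · intro hs; omega
      · rw [hI, tLoop_stop _ _ _ _ _ _ (by omega), tLoop_stop _ _ _ _ _ _ (by omega)]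
  | succ m ih =>
      have hjw : j < ws.length := by omega
      have hjt : j < t.length := by omega
      have hget : t[j]? = ws[j]? := pv_agree_get hdrop j le_rfl
      have hgete : t[j] = ws[j] := by
        have h2 := hget
        rw [List.getElem?_eq_getElem hjt, List.getElem?_eq_getElem hjw] at h2
        exact Option.some.inj h2
      by_cases hstop : t[j] = "stop"
      · have hI : takenoteInner (m + 1) t c j = (t, c) := by
          simp only [takenoteInner, dif_pos hjt, if_pos hstop]
        refine ⟨j, le_rfl, by omega, ?_, ?_, ?_, ?_, ?_⟩
        · intro k _; rw [hI]
        · intro k hk1 hk2; omega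
        · rw [hI]; exact hdrop
        · intro _; rw [← hget, List.getElem?_eq_getElem hjt, hstop]
        · rw [hI]
          simp only [takenoteLoop, dif_pos hjw]
          rw [if_pos trivial, if_pos (by rw [← hgete]; exact hstop)]
          have hf : ws.length - (j + 1) = m := by omega
          rw [hf]
      · have hI : takenoteInner (m + 1) t c j
            = takenoteInner m (t.set j "0") (c ++ [t[j]]) (j + 1) := by
          simp only [takenoteInner, dif_pos hjt, if_neg hstop]
        have hlen' : (t.set j "0").length = ws.length := by simpa using hlen
        have hdrop' : (t.set j "0").drop (j + 1) = ws.drop (j + 1) :=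
          pv_drop_set.trans (pv_agree_tail hdrop)
        obtain ⟨s, hjs, hsl, hbelow, hzero, hdrops, hstopc, hbl⟩ :=
          ih (j + 1) (t.set j "0") (c ++ [t[j]]) (by omega) hlen' hdrop' (by omega)
        refine ⟨s, by omega, hsl, ?_, ?_, ?_, hstopc, ?_⟩
        · intro k hk
          rw [hI, hbelow k (by omega), List.getElem?_set_ne (by omega)]
        · intro k hk1 hk2
          rw [hI]
          rcases Nat.lt_or_ge k (j + 1) with hk | hk
          · have hkj : k = j := by omega
            subst hkj
            rw [hbelow k (by omega)]
            simp [hjt]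
          · exact hzero k hk hk2
        · rw [hI]; exact hdrops
        · rw [hI]
          simp only [takenoteLoop, dif_pos hjw]
          rw [if_pos trivial, if_neg (by rw [← hgete]; exact hstop), ← hgete]
          exact hbl

-- main simulation: A's outer loop = B's loop in the non-collecting state (canonical fuels)
theorem takenote_main (ws : List String) :
    ∀ i t c, t.length = ws.length → t.drop i = ws.drop i →
    takenoteOuter (t.length - i) t c i = takenoteLoop ws (ws.length - i) i false t c := by
  intro i t c hlen hdrop
  induction hm : ws.length - i using Nat.strong_induction_on generalizing i t c with
  | _ n ih =>
  subst hm
  by_cases hil : i < ws.length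
  · have hit : i < t.length := by omega
    have hgi : t[i]? = ws[i]? := pv_agree_get hdrop i le_rfl
    have hgie : t[i] = ws[i] := by
      have h2 := hgi
      rw [List.getElem?_eq_getElem hit, List.getElem?_eq_getElem hil] at h2
      exact Option.some.inj h2
    have hgi1 : t[i + 1]? = ws[i + 1]? := pv_agree_get hdrop (i + 1) (by omega)
    have hcast : ((i : Int) + 1) = (((i + 1 : Nat)) : Int) := by push_cast; ring
    have hcond : takenoteCond t i = ((ws[i] == "take") && (ws[i + 1]? == some "note")) := by
      rw [takenoteCond_eq, hcast]
      simp only [PySem.List.pyGet?_natCast]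
      rw [hgi, hgi1, List.getElem?_eq_getElem hil]
      simp
    have hbcond : (PySem.List.pyGet? ws ((i : Int) + 1) == some "note") = (ws[i + 1]? == some "note") := by
      rw [hcast, PySem.List.pyGet?_natCast]
    have hfa : t.length - i = (t.length - (i + 1)) + 1 := by omega
    have hfb : ws.length - i = (ws.length - (i + 1)) + 1 := by omega
    by_cases hmk : ((ws[i] == "take") && (ws[i + 1]? == some "note")) = true
    · -- marker fires
      have hnote : ws[i + 1]? = some "note" := by
        have h2 := (Bool.and_eq_true _ _).mp hmk
        simpa using h2.2
      have hi1 : i + 1 < ws.length := (List.getElem?_eq_some_iff.mp hnote).1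
      have hdrop2 : t.drop (i + 2) = ws.drop (i + 2) := pv_agree_tail (pv_agree_tail hdrop)
      obtain ⟨s, hjs, hsl, hbelow, hzero, hdrops, hstopc, hbl⟩ :=
        takenoteInner_sim ws (i + 2) t c (by omega) hlen hdrop2
      have hplen : (takenoteInner (ws.length - (i + 2)) t c (i + 2)).1.length = ws.length := by
        rw [takenoteInner_length]; exact hlen
      have hinf : takenoteInner t.length t c (i + 2)
          = takenoteInner (ws.length - (i + 2)) t c (i + 2) :=
        (tInner_mono _ _ t c (i + 2) (by omega) (by omega)).symm
      have hskip : takenoteOuter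
            ((takenoteInner (ws.length - (i + 2)) t c (i + 2)).1.length - (i + 1))
            (takenoteInner (ws.length - (i + 2)) t c (i + 2)).1
            (takenoteInner (ws.length - (i + 2)) t c (i + 2)).2 (i + 1)
          = takenoteOuter
            ((takenoteInner (ws.length - (i + 2)) t c (i + 2)).1.length - (s + 1))
            (takenoteInner (ws.length - (i + 2)) t c (i + 2)).1
            (takenoteInner (ws.length - (i + 2)) t c (i + 2)).2 (s + 1) := by
        have h2 := takenoteOuter_skip (takenoteInner (ws.length - (i + 2)) t c (i + 2)).1
          (takenoteInner (ws.length - (i + 2)) t c (i + 2)).2 (s - i) (i + 1) ?_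
        · rw [(by omega : i + 1 + (s - i) = s + 1)] at h2
          exact h2
        · intro k hk1 hk2
          apply takenoteCond_ne_take
          rw [PySem.List.pyGet?_natCast]
          by_cases hk : k = i + 1
          · subst hk
            rw [hbelow (i + 1) (by omega), hgi1, hnote]
            simp
          · by_cases hks : k < s
            · rw [hzero k (by omega) hks]; simp
            · have hks' : k = s := by omega
              rw [hks']
              by_cases hsw : s < ws.length
              · rw [pv_agree_get hdrops s le_rfl, hstopc hsw]
                simp
              · rw [List.getElem?_eq_none (by omega)]
                simp
      have hA : takenoteOuter (t.length - i) t c i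
          = takenoteOuter (t.length - (i + 1))
              (takenoteInner (ws.length - (i + 2)) t c (i + 2)).1
              (takenoteInner (ws.length - (i + 2)) t c (i + 2)).2 (i + 1) := by
        rw [hfa]
        simp only [takenoteOuter, if_pos hit]
        rw [if_pos (by rw [hcond]; exact hmk), hinf]
      have hB : takenoteLoop ws (ws.length - i) i false t c
          = takenoteLoop ws (ws.length - (i + 2)) (i + 2) true t c := by
        rw [hfb]
        simp only [takenoteLoop, dif_pos hil]
        rw [if_neg Bool.false_ne_true, if_pos (by rw [hbcond]; exact hmk)]
        exact (tLoop_mono ws _ _ (i + 2) true t c (by omega) (by omega)).symm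
      calc takenoteOuter (t.length - i) t c i
          = takenoteOuter (t.length - (i + 1))
              (takenoteInner (ws.length - (i + 2)) t c (i + 2)).1
              (takenoteInner (ws.length - (i + 2)) t c (i + 2)).2 (i + 1) := hA
        _ = takenoteOuter ((takenoteInner (ws.length - (i + 2)) t c (i + 2)).1.length - (i + 1))
              (takenoteInner (ws.length - (i + 2)) t c (i + 2)).1
              (takenoteInner (ws.length - (i + 2)) t c (i + 2)).2 (i + 1) := by
                rw [hplen, hlen]
        _ = takenoteOuter ((takenoteInner (ws.length - (i + 2)) t c (i + 2)).1.length - (s + 1))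
              (takenoteInner (ws.length - (i + 2)) t c (i + 2)).1
              (takenoteInner (ws.length - (i + 2)) t c (i + 2)).2 (s + 1) := hskip
        _ = takenoteLoop ws (ws.length - (s + 1)) (s + 1) false
              (takenoteInner (ws.length - (i + 2)) t c (i + 2)).1
              (takenoteInner (ws.length - (i + 2)) t c (i + 2)).2 :=
                ih (ws.length - (s + 1)) (by omega) (s + 1) _ _ hplen (pv_agree_tail hdrops) rfl
        _ = takenoteLoop ws (ws.length - (i + 2)) (i + 2) true t c := hbl.symm
        _ = takenoteLoop ws (ws.length - i) i false t c := hB.symm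
    · -- no marker at i
      have hcondf : takenoteCond t i = false := by
        rw [hcond]; exact Bool.eq_false_iff.mpr hmk
      have hA : takenoteOuter (t.length - i) t c i = takenoteOuter (t.length - (i + 1)) t c (i + 1) := by
        rw [hfa]
        simp only [takenoteOuter, if_pos hit]
        rw [if_neg (by simp [hcondf])]
      have hB : takenoteLoop ws (ws.length - i) i false t c
          = takenoteLoop ws (ws.length - (i + 1)) (i + 1) false t c := by
        rw [hfb]
        simp only [takenoteLoop, dif_pos hil]
        rw [if_neg Bool.false_ne_true, if_neg (by rw [hbcond]; exact hmk)]
      rw [hA, hB]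
      exact ih (ws.length - (i + 1)) (by omega) (i + 1) t c hlen (pv_agree_tail hdrop) rfl
  · rw [tOuter_stop _ _ _ _ (by omega), tLoop_stop _ _ _ _ _ _ (by omega)]

-- ===== VERDICT (by name: the statement is the Claim_ definition above) =====
theorem takenote_spec : Claim_equal_takenote := by
  intro text _ _
  unfold Spec_takenote takenote takenote_alt
  simp only
  have h := takenote_main ((PySem.Str.split? text " ").getD []) 0
    ((PySem.Str.split? text " ").getD []) [] rfl rfl
  simp only [Nat.sub_zero] at h
  rw [h]
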